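-- pv_equiv track=rewrite | github.com/Din0zaBr/DSTU | TheoryOfInformation/sem6/fourth_lab/main.py | poly_to_matrix
-- ===== SOURCE A (Python) =====
-- def poly_to_matrix(poly_str, n, k):
--     """
--     Преобразует полином в порождающую матрицу, т.е.
--     Создает порождающую матрицу на основе полинома.
--     :param poly_str:
--     :param n:
--     :param k:
--     :return:
--     """
--     g = [int(bit) for bit in poly_str]
--     # m = len(g) - 1
--     G = []
--     for i in range(k):
--         row = [0] * i + g + [0] * (k - i - 1)
--         row = row[:n]
--         G.append(row)
--     return G
-- ===== SOURCE B (Python) =====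
-- def poly_to_matrix(poly_str, n, k):
--     g = [int(bit) for bit in poly_str]
--     width = min(n, len(g) + k - 1)
--     return [[g[j - i] if 0 <= j - i < len(g) else 0 for j in range(width)]
--             for i in range(k)]
-- ===== Notes on version B (the rewrite author's own statement) =====
-- stated objective: alternative
-- what changed: B never materialises A's over-long concatenated row ([0]*i + g + [0]*(k-i-1)) followed by a slice: it computes the row width min(n, len(g)+k-1) once and fills each entry directly with the band formula G[i][j] = g[j-i] if 0 <= j-i < len(g) else 0; Pre_ excludes strings with a non-digit character, on which A raises ValueError.
-- intended difference: For n < 0 with k > 0 and len(poly_str)+k-1+n > 0, A's row[:n] accidentally applies Python's negative-slice rule and returns rows with the last |n| columns dropped, while B treats the negative column count n as width 0 and returns k empty rows, the intended reading of n as a matrix width. — e.g. on poly_to_matrix("101", -1, 2): A returns [[1, 0, 1], [0, 1, 0]], B returns [[], []]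
import Mathlib
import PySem

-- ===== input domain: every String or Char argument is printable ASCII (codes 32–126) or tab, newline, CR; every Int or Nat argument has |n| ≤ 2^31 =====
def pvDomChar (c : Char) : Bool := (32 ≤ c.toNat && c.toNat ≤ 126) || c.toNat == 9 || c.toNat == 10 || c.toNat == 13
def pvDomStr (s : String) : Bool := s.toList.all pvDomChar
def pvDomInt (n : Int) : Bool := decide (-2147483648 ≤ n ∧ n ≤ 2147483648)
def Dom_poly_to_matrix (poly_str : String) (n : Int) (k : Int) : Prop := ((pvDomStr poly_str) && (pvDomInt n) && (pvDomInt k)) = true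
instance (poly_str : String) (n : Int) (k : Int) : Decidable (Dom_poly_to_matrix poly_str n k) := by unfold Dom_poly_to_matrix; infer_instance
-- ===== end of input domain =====

-- B fills the k×min(n,len(g)+k-1) matrix directly with the band formula g[j-i] instead of
-- building each over-long row by concatenation and slicing (objective: alternative decomposition);
-- for n < 0 B returns empty rows where A's slice accidentally truncates from the right (see D_).

-- ===== PORT A =====
def poly_to_matrix (poly_str : String) (n : Int) (k : Int) : List (List Int) :=
  -- int(bit): exact for the digit characters admitted by Pre_ (value = code point - 48)
  let g : List Int := poly_str.toList.map (fun c => ((c.toNat : Int) - 48))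
  (PySem.List.pyRange 0 k 1).foldl
    (fun G i =>
      G ++ [PySem.List.slice
              (List.replicate i.toNat (0 : Int) ++ g ++ List.replicate (k - i - 1).toNat (0 : Int))
              none (some n)])
    []

-- ===== PORT B =====
def poly_to_matrix_alt (poly_str : String) (n : Int) (k : Int) : List (List Int) :=
  let g : List Int := poly_str.toList.map (fun c => ((c.toNat : Int) - 48))
  let width : Int := min n ((g.length : Int) + k - 1)
  (PySem.List.pyRange 0 k 1).map (fun i =>
    (PySem.List.pyRange 0 width 1).map (fun j =>
      -- g[j - i] under the guard 0 ≤ j - i < len(g): exact via getD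
      if 0 ≤ j - i ∧ j - i < (g.length : Int) then g.getD (j - i).toNat 0 else 0))

-- ===== PRECONDITION & SPEC =====
-- Pre_ excludes exactly the inputs where A raises ValueError: int(bit) on a non-digit character.
def Pre_poly_to_matrix (poly_str : String) (n : Int) (k : Int) : Prop :=
  poly_str.toList.all (fun c => 48 ≤ c.toNat && c.toNat ≤ 57) = true
instance (poly_str : String) (n : Int) (k : Int) : Decidable (Pre_poly_to_matrix poly_str n k) := by unfold Pre_poly_to_matrix; infer_instance
def pvWitness_poly_to_matrix : String × Int × Int := ("1011", 7, 3)

-- For n < 0 with k > 0 and len(poly_str)+k-1+n > 0, A's row[:n] accidentally applies Python's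
-- negative-slice rule and returns rows with the last |n| columns dropped, while B treats the
-- negative column count n as width 0 and returns k empty rows, the intended reading of a width.
def D_poly_to_matrix (poly_str : String) (n : Int) (k : Int) : Prop :=
  n < 0 ∧ 0 < k ∧ 0 < (poly_str.toList.length : Int) + k - 1 + n
instance (poly_str : String) (n : Int) (k : Int) : Decidable (D_poly_to_matrix poly_str n k) := by unfold D_poly_to_matrix; infer_instance

def Spec_poly_to_matrix (poly_str : String) (n : Int) (k : Int) (out : List (List Int)) : Prop := ¬ D_poly_to_matrix poly_str n k → out = poly_to_matrix_alt poly_str n k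
instance (poly_str : String) (n : Int) (k : Int) (out : List (List Int)) : Decidable (Spec_poly_to_matrix poly_str n k out) := by unfold Spec_poly_to_matrix; infer_instance

def pvDiffWitness_poly_to_matrix : String × Int × Int := ("101", -1, 2)
def pvDiffWitnessOut_poly_to_matrix : (List (List Int)) × (List (List Int)) :=
  ([[1, 0, 1], [0, 1, 0]], [[], []])

-- ===== CLAIM (what is proved, stated in full; the proofs are below) =====
def Claim_unchanged_poly_to_matrix : Prop := ∀ (poly_str : String) (n : Int) (k : Int), Dom_poly_to_matrix poly_str n k → Pre_poly_to_matrix poly_str n k → Spec_poly_to_matrix poly_str n k (poly_to_matrix poly_str n k)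
def Claim_changed_poly_to_matrix : Prop := Dom_poly_to_matrix (pvDiffWitness_poly_to_matrix.1) (pvDiffWitness_poly_to_matrix.2.1) (pvDiffWitness_poly_to_matrix.2.2) ∧ Pre_poly_to_matrix (pvDiffWitness_poly_to_matrix.1) (pvDiffWitness_poly_to_matrix.2.1) (pvDiffWitness_poly_to_matrix.2.2) ∧ D_poly_to_matrix (pvDiffWitness_poly_to_matrix.1) (pvDiffWitness_poly_to_matrix.2.1) (pvDiffWitness_poly_to_matrix.2.2) ∧ poly_to_matrix (pvDiffWitness_poly_to_matrix.1) (pvDiffWitness_poly_to_matrix.2.1) (pvDiffWitness_poly_to_matrix.2.2) = pvDiffWitnessOut_poly_to_matrix.1 ∧ poly_to_matrix_alt (pvDiffWitness_poly_to_matrix.1) (pvDiffWitness_poly_to_matrix.2.1) (pvDiffWitness_poly_to_matrix.2.2) = pvDiffWitnessOut_poly_to_matrix.2 ∧ pvDiffWitnessOut_poly_to_matrix.1 ≠ pvDiffWitnessOut_poly_to_matrix.2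
def Claim_exact_poly_to_matrix : Prop := ∀ (poly_str : String) (n : Int) (k : Int), Dom_poly_to_matrix poly_str n k → Pre_poly_to_matrix poly_str n k → D_poly_to_matrix poly_str n k → poly_to_matrix poly_str n k ≠ poly_to_matrix_alt poly_str n k

-- ===== LEMMAS AND PROOFS =====

theorem foldl_append_singleton {α β : Type} (f : α → β) :
    ∀ (l : List α) (acc : List β),
      l.foldl (fun G i => G ++ [f i]) acc = acc ++ l.map f := by
  intro l
  induction l with
  | nil => intro acc; simp
  | cons x xs ih => intro acc; simp [List.foldl, ih]

-- A's sliced row i equals B's band-formula row, provided n is not in the truncating regime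
-- (n ≥ 0, or the slice empties the row entirely).
theorem row_eq (g : List Int) (n k i : Int) (hi0 : 0 ≤ i) (hik : i < k)
    (hnd : n < 0 → (g.length : Int) + k - 1 + n ≤ 0) :
    PySem.List.slice
        (List.replicate i.toNat (0 : Int) ++ g ++ List.replicate (k - i - 1).toNat (0 : Int))
        none (some n)
      = (PySem.List.pyRange 0 (min n ((g.length : Int) + k - 1)) 1).map
          (fun j => if 0 ≤ j - i ∧ j - i < (g.length : Int) then g.getD (j - i).toNat 0 else 0) := by
  have hk1 : 1 ≤ k := by omega
  set a := i.toNat with ha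
  set b := (k - i - 1).toNat with hb
  set gl := g.length with hgl
  set R := List.replicate a (0:Int) ++ g ++ List.replicate b (0:Int) with hR
  set L : Int := min n ((gl:Int) + k - 1) with hLdef
  have hRlen : R.length = a + gl + b := by simp [hR]; omega
  have key : ∃ m : Nat, PySem.List.slice R none (some n) = R.take m ∧ min m R.length = L.toNat := by
    by_cases h : n < 0
    · refine ⟨R.length - (-n).toNat, ?_, ?_⟩
      · have h' := PySem.List.slice_to_neg_natCast R (-n).toNat (by omega)
        rw [show (-(((-n).toNat : Nat) : Int)) = n by omega] at h'
        exact h'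
      · have := hnd h
        rw [hRlen, hLdef]; omega
    · refine ⟨n.toNat, PySem.List.slice_to R (by omega), ?_⟩
      rw [hRlen, hLdef]; omega
  obtain ⟨m, hms, hmlen⟩ := key
  rw [hms, PySem.List.pyRange_one]
  apply List.ext_getElem
  · simp only [List.length_take, hmlen, List.length_map, List.length_range]
    omega
  · intro j h1 h2
    have hjL : j < L.toNat := by simpa [List.length_take, hmlen] using h1
    have hjR : j < R.length := by omega
    simp only [List.getElem_map, List.getElem_range, List.getElem_take, zero_add]
    have key2 : R[j]? = some (if 0 ≤ (j:Int) - i ∧ (j:Int) - i < (gl:Int) then g.getD ((j:Int) - i).toNat 0 else 0) := by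
      rw [hR]
      by_cases hc : j < a + gl
      · rw [List.getElem?_append_left (by simp; omega)]
        by_cases hc2 : j < a
        · rw [List.getElem?_append_left (by simpa using hc2)]
          rw [List.getElem?_replicate, if_pos hc2, if_neg (by omega)]
        · rw [List.getElem?_append_right (by simpa using Nat.le_of_not_lt hc2)]
          simp only [List.length_replicate]
          rw [List.getElem?_eq_getElem (by omega), if_pos (by constructor <;> omega)]
          congr 1
          rw [List.getD_eq_getElem g 0 (by omega : ((j:Int) - i).toNat < g.length)]
          congr 1
          omega
      · rw [List.getElem?_append_right (by simp; omega)]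
        simp only [List.length_append, List.length_replicate]
        rw [List.getElem?_replicate, if_pos (by omega), if_neg (by omega)]
    rw [List.getElem?_eq_getElem hjR] at key2
    exact Option.some.inj key2

theorem poly_to_matrix_spec : Claim_unchanged_poly_to_matrix := by
  intro poly_str n k _ _ hnd
  unfold poly_to_matrix poly_to_matrix_alt
  rw [foldl_append_singleton]
  simp only [List.nil_append]
  apply List.map_congr_left
  intro i hi
  rw [PySem.List.mem_pyRange_one] at hi
  apply row_eq _ n k i hi.1 hi.2
  intro hn
  unfold D_poly_to_matrix at hnd
  simp only [List.length_map]
  omega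

theorem poly_to_matrix_changed : Claim_changed_poly_to_matrix := by
  unfold Claim_changed_poly_to_matrix; decide

-- Inside D_ the first rows already differ: A's first row has positive length, B's is empty.
theorem poly_to_matrix_tight : Claim_exact_poly_to_matrix := by
  intro poly_str n k _ _ hd heq
  obtain ⟨hn, hk, hband⟩ := hd
  set g : List Int := poly_str.toList.map (fun c => ((c.toNat : Int) - 48)) with hg
  have hgl : (g.length : Int) = (poly_str.toList.length : Int) := by simp [hg]
  -- first element of each side
  have hA : (poly_to_matrix poly_str n k).head? =
      some (PySem.List.slice (g ++ List.replicate (k - 1).toNat (0 : Int)) none (some n)) := by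
    unfold poly_to_matrix
    rw [foldl_append_singleton]
    simp only [List.nil_append]
    rw [PySem.List.pyRange_one_cons (by omega)]
    simp [← hg]
  have hB : (poly_to_matrix_alt poly_str n k).head? =
      some ((PySem.List.pyRange 0 (min n ((g.length : Int) + k - 1)) 1).map
        (fun j => if 0 ≤ j - 0 ∧ j - 0 < (g.length : Int) then g.getD (j - 0).toNat 0 else 0)) := by
    unfold poly_to_matrix_alt
    rw [PySem.List.pyRange_one_cons (by omega)]
    simp [← hg]
  rw [heq, hB] at hA
  have hA' := Option.some.inj hA
  -- B's first row is empty (width < 0), A's first row is nonempty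
  have hBempty : (PySem.List.pyRange 0 (min n ((g.length : Int) + k - 1)) 1) = [] := by
    rw [PySem.List.pyRange_one]
    have h0 : (min n ((g.length : Int) + k - 1) - 0).toNat = 0 := by omega
    rw [h0]; simp
  rw [hBempty] at hA'
  simp only [List.map_nil] at hA'
  have hlen : (PySem.List.slice (g ++ List.replicate (k - 1).toNat (0 : Int)) none (some n)).length = 0 := by
    rw [← hA']; rfl
  have hslice := PySem.List.slice_to_neg_natCast (g ++ List.replicate (k - 1).toNat (0 : Int)) (-n).toNat (by omega)
  rw [show (-(((-n).toNat : Nat) : Int)) = n by omega] at hslice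
  rw [hslice] at hlen
  simp only [List.length_take, List.length_append, List.length_replicate] at hlen
  omega
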